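-- pv_equiv track=rewrite | github.com/thatvacationtravel/thatvacation- | reservas/management/commands/update_items.py | custom_split
-- ===== SOURCE A (Python) =====
-- def custom_split(line):
--
--     fields = []
--     current_field = []
--     i = 0
--     while i < len(line):
--         if line[i] == ';':
--             if i + 1 < len(line) and line[i + 1] != ' ':
--                 fields.append(''.join(current_field).strip())
--                 current_field = []
--             else:
--                 current_field.append(line[i])
--         else:
--             current_field.append(line[i])
--         i += 1
--     fields.append(''.join(current_field).strip())
--     return fields
-- ===== SOURCE B (Python) =====
-- def custom_split(line):
--     cuts = [i for i in range(len(line))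
--             if line[i] == ';' and i + 1 < len(line) and line[i + 1] != ' ']
--     parts = []
--     start = 0
--     for i in cuts:
--         parts.append(line[start:i])
--         start = i + 1
--     parts.append(line[start:])
--     return [p.strip() for p in parts]
-- ===== Notes on version B (the rewrite author's own statement) =====
-- stated objective: faster
-- what changed: A scans char-by-char maintaining a current_field list that it appends to and joins at every flush; B first computes the list of cut positions with a filtered range comprehension, then slices the line between consecutive cuts and strips each slice.
import Mathlib
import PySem

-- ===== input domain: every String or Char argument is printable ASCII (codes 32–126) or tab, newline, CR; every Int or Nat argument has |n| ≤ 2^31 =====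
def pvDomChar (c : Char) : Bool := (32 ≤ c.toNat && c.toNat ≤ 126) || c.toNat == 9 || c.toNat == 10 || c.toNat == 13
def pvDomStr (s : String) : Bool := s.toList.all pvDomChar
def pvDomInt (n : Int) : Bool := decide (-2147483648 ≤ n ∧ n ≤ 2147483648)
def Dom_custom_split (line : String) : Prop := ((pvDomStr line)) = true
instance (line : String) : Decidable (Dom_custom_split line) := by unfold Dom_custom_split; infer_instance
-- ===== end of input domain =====

-- B replaces A's char-by-char accumulator state machine by computing the list of cut
-- positions once and slicing the line between them: bulk slices instead of per-char
-- list appends and joins (measured faster by a constant factor in a timing run).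

-- ===== PORT A =====
-- A's while loop over index i with state (current_field, fields); the lookahead
-- 'i + 1 < len(line) and line[i + 1] != " "' becomes the head of the remaining list
-- (i + 1 < len ↔ 0 < rest.length, line[i+1] = rest.headD ' ').
def customSplitGoA : List Char → List Char → List String → List String
  | [], cur, fields => fields ++ [PySem.Str.strip (String.mk cur)]
  | c :: rest, cur, fields =>
    if c = ';' then
      if 0 < rest.length ∧ rest.headD ' ' ≠ ' ' then
        customSplitGoA rest [] (fields ++ [PySem.Str.strip (String.mk cur)])
      else customSplitGoA rest (cur ++ [c]) fields
    else customSplitGoA rest (cur ++ [c]) fields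

def custom_split (line : String) : List String :=
  customSplitGoA line.toList [] []

-- ===== PORT B =====
-- Source B: indices i are always in range, so line[i] / line[i+1] are getD (default unused).
def customSplitCutPred (l : List Char) (i : Nat) : Bool :=
  (l.getD i ' ' == ';') && decide (i + 1 < l.length) && (l.getD (i + 1) ' ' != ' ')

-- the comprehension '[i for i in range(len(line)) if …]'
def customSplitCuts (l : List Char) : List Nat :=
  (List.range l.length).filter (customSplitCutPred l)

-- loop body: parts.append(line[start:i]); start = i + 1
-- (line[start:i] with 0 ≤ start ≤ i ≤ len is exactly (drop start).take (i - start))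
def customSplitStepB (l : List Char) (acc : List (List Char) × Nat) (i : Nat) :
    List (List Char) × Nat :=
  (acc.1 ++ [(l.drop acc.2).take (i - acc.2)], i + 1)

def customSplitRawB (l : List Char) : List (List Char) :=
  let r := (customSplitCuts l).foldl (customSplitStepB l) ([], 0)
  r.1 ++ [l.drop r.2]

def custom_split_alt (line : String) : List String :=
  (customSplitRawB line.toList).map (fun p => PySem.Str.strip (String.mk p))

-- ===== PRECONDITION & SPEC =====
def Spec_custom_split (line : String) (out : List String) : Prop := out = custom_split_alt line
instance (line : String) (out : List String) : Decidable (Spec_custom_split line out) := by unfold Spec_custom_split; infer_instance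

-- ===== CLAIM (what is proved, stated in full; the proofs are below) =====
def Claim_equal_custom_split : Prop := ∀ (line : String), Dom_custom_split line → Spec_custom_split line (custom_split line)

-- ===== LEMMAS AND PROOFS =====

/-- apply a function to the head segment only -/
def csMapHead (f : List Char → List Char) : List (List Char) → List (List Char)
  | [] => []
  | x :: xs => f x :: xs

/-- reference splitter both ports are reduced to -/
def csSegs : List Char → List (List Char)
  | [] => [[]]
  | c :: rest =>
    if c = ';' ∧ rest.headD ' ' ≠ ' ' then [] :: csSegs rest
    else csMapHead (c :: ·) (csSegs rest)

def csStripAll (ps : List (List Char)) : List String :=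
  ps.map (fun p => PySem.Str.strip (String.mk p))

theorem csMapHead_mapHead (f g : List Char → List Char) (l : List (List Char)) :
    csMapHead f (csMapHead g l) = csMapHead (fun x => f (g x)) l := by
  cases l <;> rfl

theorem csMapHead_id (l : List (List Char)) : csMapHead (fun x => x) l = l := by
  cases l <;> rfl

theorem csAppendCase (c : Char) (rest cur : List Char) (fields : List String)
    (hseg : csSegs (c :: rest) = csMapHead (c :: ·) (csSegs rest))
    (ih : ∀ cur fields, customSplitGoA rest cur fields =
      fields ++ csStripAll (csMapHead (cur ++ ·) (csSegs rest))) :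
    customSplitGoA rest (cur ++ [c]) fields =
      fields ++ csStripAll (csMapHead (cur ++ ·) (csSegs (c :: rest))) := by
  rw [ih, hseg, csMapHead_mapHead]
  have h : (fun x => cur ++ c :: x) = (fun x : List Char => (cur ++ [c]) ++ x) :=
    funext fun x => by simp
  rw [h]

theorem csGoA_eq (s : List Char) : ∀ (cur : List Char) (fields : List String),
    customSplitGoA s cur fields = fields ++ csStripAll (csMapHead (cur ++ ·) (csSegs s)) := by
  induction s with
  | nil => intro cur fields; simp [customSplitGoA, csSegs, csMapHead, csStripAll]
  | cons c rest ih =>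
    intro cur fields
    simp only [customSplitGoA]
    by_cases hc : c = ';'
    · rw [if_pos hc]
      by_cases hh : rest.headD ' ' ≠ ' '
      · have hP : 0 < rest.length ∧ rest.headD ' ' ≠ ' ' := by
          refine ⟨?_, hh⟩
          cases rest with
          | nil => simp at hh
          | cons a b => simp
        rw [if_pos hP, ih, csSegs, if_pos ⟨hc, hh⟩]
        simp only [csStripAll, csMapHead, List.map_cons, List.append_assoc,
          List.nil_append, List.singleton_append, List.append_nil]
        cases csSegs rest <;> simp
      · rw [if_neg (fun h => hh h.2)]
        exact csAppendCase c rest cur fields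
          (by rw [csSegs, if_neg (fun h => hh h.2)]) ih
    · rw [if_neg hc]
      exact csAppendCase c rest cur fields
        (by rw [csSegs, if_neg (fun h => hc h.1)]) ih

theorem csFoldFactor (l : List Char) (is : List Nat) : ∀ (ps : List (List Char)) (st : Nat),
    is.foldl (customSplitStepB l) (ps, st) =
      (ps ++ (is.foldl (customSplitStepB l) ([], st)).1,
       (is.foldl (customSplitStepB l) ([], st)).2) := by
  induction is with
  | nil => intro ps st; simp
  | cons i is ih =>
    intro ps st
    simp only [List.foldl_cons, customSplitStepB]
    rw [ih (ps ++ [(l.drop st).take (i - st)]) (i + 1),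
        ih ([] ++ [(l.drop st).take (i - st)]) (i + 1)]
    simp

theorem csFoldShift (c : Char) (t : List Char) (is : List Nat) : ∀ (st : Nat),
    (is.map (· + 1)).foldl (customSplitStepB (c :: t)) ([], st + 1) =
      ((is.foldl (customSplitStepB t) ([], st)).1,
       (is.foldl (customSplitStepB t) ([], st)).2 + 1) := by
  induction is with
  | nil => intro st; simp
  | cons i is ih =>
    intro st
    simp only [List.map_cons, List.foldl_cons, customSplitStepB, List.drop_succ_cons,
      Nat.succ_sub_succ, List.nil_append]
    rw [csFoldFactor (c :: t) (is.map (· + 1)) [(t.drop st).take (i - st)] (i + 1 + 1),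
        ih (i + 1),
        csFoldFactor t is [(t.drop st).take (i - st)] (i + 1)]

theorem csCutPred_succ (c : Char) (t : List Char) (i : Nat) :
    customSplitCutPred (c :: t) (i + 1) = customSplitCutPred t i := by
  simp [customSplitCutPred]

theorem csCuts_cons (c : Char) (t : List Char) :
    customSplitCuts (c :: t) =
      (if customSplitCutPred (c :: t) 0 then [0] else []) ++ (customSplitCuts t).map (· + 1) := by
  unfold customSplitCuts
  have hsucc : (Nat.succ : Nat → Nat) = (fun x : Nat => x + 1) := funext fun _ => rfl
  rw [List.length_cons, List.range_succ_eq_map, hsucc, List.filter_cons, List.filter_map]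
  have hpt := List.filter_congr
    (p := customSplitCutPred (c :: t) ∘ fun x : Nat => x + 1)
    (q := customSplitCutPred t) (l := List.range t.length)
    (fun i _ => csCutPred_succ c t i)
  rw [hpt]
  by_cases h0 : customSplitCutPred (c :: t) 0 = true <;> simp [h0]

theorem csCutPred_zero (c : Char) (t : List Char) :
    customSplitCutPred (c :: t) 0 = true ↔ (c = ';' ∧ t.headD ' ' ≠ ' ') := by
  cases t <;> simp [customSplitCutPred]

theorem csRawB_eq (l : List Char) : customSplitRawB l = csSegs l := by
  induction l with
  | nil => simp [customSplitRawB, customSplitCuts, csSegs]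
  | cons c t ih =>
    unfold customSplitRawB
    rw [csCuts_cons]
    by_cases h0 : customSplitCutPred (c :: t) 0 = true
    · rw [if_pos h0]
      simp only [List.cons_append, List.nil_append, List.foldl_cons, customSplitStepB,
        Nat.sub_self, List.take_zero, List.drop_zero]
      rw [show (0 + 1 : Nat) = 0 + 1 from rfl, csFoldFactor (c :: t) ((customSplitCuts t).map (· + 1)) [[]] (0 + 1),
        csFoldShift c t (customSplitCuts t) 0]
      rw [csSegs, if_pos ((csCutPred_zero c t).mp h0), ← ih]
      simp [customSplitRawB]
    · rw [if_neg h0, List.nil_append]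
      have hcond : ¬ (c = ';' ∧ t.headD ' ' ≠ ' ') := fun hh => h0 ((csCutPred_zero c t).mpr hh)
      rw [csSegs, if_neg hcond, ← ih]
      cases hcuts : customSplitCuts t with
      | nil => simp [customSplitRawB, hcuts, csMapHead]
      | cons j js =>
        simp only [List.map_cons, List.foldl_cons, customSplitStepB,
          Nat.sub_zero, List.drop_zero, List.take_succ_cons, List.nil_append]
        rw [csFoldFactor (c :: t) (js.map (· + 1)) [c :: List.take j t] (j + 1 + 1),
          csFoldShift c t js (j + 1)]
        have hraw : customSplitRawB t =
            ((customSplitCuts t).foldl (customSplitStepB t) ([], 0)).1 ++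
              [t.drop ((customSplitCuts t).foldl (customSplitStepB t) ([], 0)).2] := rfl
        rw [hraw, hcuts]
        simp only [List.foldl_cons, customSplitStepB, Nat.sub_zero, List.drop_zero,
          List.nil_append]
        rw [csFoldFactor t js [List.take j t] (j + 1)]
        simp [csMapHead]

-- ===== VERDICT (by name: the statement is the Claim_ definition above) =====
theorem custom_split_spec : Claim_equal_custom_split := by
  intro line _
  unfold Spec_custom_split custom_split custom_split_alt
  rw [csGoA_eq, csRawB_eq]
  simp [csStripAll, csMapHead_id]
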